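-- pv_equiv track=rewrite | github.com/BoarIncorporated/Fish-solver | src/arkose_session/bio.py | convert_list_to_str
-- ===== SOURCE A (Python) =====
-- def convert_list_to_str(list_of_dicts):
--     """Converts a list of dictionaries to a CSV-formatted string.
--
--     Args:
--       list_of_dicts: A list of dictionaries, where each dictionary
--                      should contain 'timestamp', 'type', 'x', and 'y' keys.
--
--     Returns:
--       A CSV string representation of the data. Returns an error message if the input is invalid.
--     """
--     if not isinstance(list_of_dicts, list):
--         return "Error: Input must be a list of dictionaries."
--
--     required_keys = {"timestamp", "type", "x", "y"}
--     for item in list_of_dicts: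
--         if not isinstance(item, dict) or not required_keys.issubset(item.keys()):
--             return "Error: Dictionaries must contain 'timestamp', 'type', 'x', and 'y' keys."
--
--     movement: str = ""
--     for item in list_of_dicts:
--         movement += f"{item['timestamp']},{item['type']},{item['x']},{item['y']};"
--     return movement
-- ===== SOURCE B (Python) =====
-- def convert_list_to_str(list_of_dicts):
--     """Map each dict to its row and join; a missing key surfaces as an
--     exception instead of an explicit key-set validation pass."""
--     if not isinstance(list_of_dicts, list):
--         return "Error: Input must be a list of dictionaries."
--     try:
--         return "".join(
--             f"{item['timestamp']},{item['type']},{item['x']},{item['y']};"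
--             for item in list_of_dicts
--         )
--     except (KeyError, TypeError):
--         return "Error: Dictionaries must contain 'timestamp', 'type', 'x', and 'y' keys."
-- ===== Notes on version B (the rewrite author's own statement) =====
-- stated objective: idiomatic
-- what changed: A runs an explicit validation pass checking the required key set of every dict and then a second pass concatenating rows with +=; B has no validation pass at all: it maps each dict to its row and joins them with ''.join, letting a missing key raise KeyError which the handler turns into the error message (Option-sequencing mapM + join in the Lean port).
import Mathlib
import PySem

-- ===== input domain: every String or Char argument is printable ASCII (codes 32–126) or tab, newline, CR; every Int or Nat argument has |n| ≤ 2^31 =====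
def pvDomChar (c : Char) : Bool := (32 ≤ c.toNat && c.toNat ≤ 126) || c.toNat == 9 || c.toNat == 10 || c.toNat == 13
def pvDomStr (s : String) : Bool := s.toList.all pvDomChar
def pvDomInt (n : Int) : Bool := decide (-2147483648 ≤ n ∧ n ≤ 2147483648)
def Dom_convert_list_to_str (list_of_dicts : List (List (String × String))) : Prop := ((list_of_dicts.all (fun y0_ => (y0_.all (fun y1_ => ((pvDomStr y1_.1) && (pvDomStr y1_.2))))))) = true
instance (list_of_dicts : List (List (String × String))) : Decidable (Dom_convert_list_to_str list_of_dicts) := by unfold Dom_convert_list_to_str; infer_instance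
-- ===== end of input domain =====

-- B replaces A's validate-then-concatenate passes by mapM-to-Option rows + join (Python: ''.join with KeyError handler); return values only, no mutation.
-- ===== PORT A =====
-- Python A's first branch (non-list input) is unreachable under the type convention and not ported.
def pvErrMsg : String := "Error: Dictionaries must contain 'timestamp', 'type', 'x', and 'y' keys."

-- required_keys.issubset(item.keys())
def pvHasKeys (item : List (String × String)) : Bool :=
  ((item.lookup "timestamp").isSome && (item.lookup "type").isSome)
    && ((item.lookup "x").isSome && (item.lookup "y").isSome)

-- f"{item['timestamp']},{item['type']},{item['x']},{item['y']};" (keys known present)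
def pvRowA (item : List (String × String)) : String :=
  ((item.lookup "timestamp").getD "") ++ "," ++ ((item.lookup "type").getD "")
    ++ "," ++ ((item.lookup "x").getD "") ++ "," ++ ((item.lookup "y").getD "") ++ ";"

-- A's first loop: error out on the first item missing a required key
def pvValidateA : List (List (String × String)) → Bool
  | [] => true
  | item :: rest => if pvHasKeys item then pvValidateA rest else false

def convert_list_to_str (list_of_dicts : List (List (String × String))) : String :=
  if pvValidateA list_of_dicts then
    -- A's second loop: movement += row
    list_of_dicts.foldl (fun movement item => movement ++ pvRowA item) ""
  else pvErrMsg

-- ===== PORT B =====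
-- item -> its row; none models the KeyError a missing key raises in Source B
def pvRowB (item : List (String × String)) : Option String :=
  match item.lookup "timestamp", item.lookup "type",
        item.lookup "x", item.lookup "y" with
  | some t, some ty, some x, some y => some (t ++ "," ++ ty ++ "," ++ x ++ "," ++ y ++ ";")
  | _, _, _, _ => none

-- the generator: all rows, or none at the first missing key (the KeyError)
def pvRowsB : List (List (String × String)) → Option (List String)
  | [] => some []
  | item :: rest =>
    match pvRowB item, pvRowsB rest with
    | some r, some rs => some (r :: rs)
    | _, _ => none

-- ''.join(...) with the except-clause as the none case
def convert_list_to_str_alt (list_of_dicts : List (List (String × String))) : String :=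
  match pvRowsB list_of_dicts with
  | some rows => PySem.Str.join "" rows
  | none => pvErrMsg

-- ===== PRECONDITION & SPEC =====
def Spec_convert_list_to_str (list_of_dicts : List (List (String × String))) (out : String) : Prop := out = convert_list_to_str_alt list_of_dicts
instance (list_of_dicts : List (List (String × String))) (out : String) : Decidable (Spec_convert_list_to_str list_of_dicts out) := by unfold Spec_convert_list_to_str; infer_instance

-- ===== CLAIM (what is proved, stated in full; the proofs are below) =====
def Claim_equal_convert_list_to_str : Prop := ∀ (list_of_dicts : List (List (String × String))), Dom_convert_list_to_str list_of_dicts → Spec_convert_list_to_str list_of_dicts (convert_list_to_str list_of_dicts)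

-- ===== LEMMAS AND PROOFS =====
lemma pvRowB_of_hasKeys (item : List (String × String)) (h : pvHasKeys item = true) :
    pvRowB item = some (pvRowA item) := by
  simp only [pvHasKeys, Bool.and_eq_true, Option.isSome_iff_exists] at h
  obtain ⟨⟨⟨t, ht⟩, ty, hty⟩, ⟨x, hx⟩, y, hy⟩ := h
  unfold pvRowB pvRowA
  rw [ht, hty, hx, hy]
  rfl

lemma pvRowB_of_not_hasKeys (item : List (String × String)) (h : pvHasKeys item = false) :
    pvRowB item = none := by
  unfold pvRowB
  rcases ht : item.lookup "timestamp" with _ | t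
  · rfl
  rcases hty : item.lookup "type" with _ | ty
  · rfl
  rcases hx : item.lookup "x" with _ | x
  · rfl
  rcases hy : item.lookup "y" with _ | y
  · rfl
  · exfalso
    simp [pvHasKeys, ht, hty, hx, hy] at h

lemma rowsB_of_valid (l : List (List (String × String))) (h : pvValidateA l = true) :
    pvRowsB l = some (l.map pvRowA) := by
  induction l with
  | nil => simp [pvRowsB]
  | cons item rest ih =>
    simp only [pvValidateA] at h
    by_cases hk : pvHasKeys item = true
    · rw [pvRowsB, pvRowB_of_hasKeys item hk, ih (by simpa [hk] using h)]
      rfl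
    · simp [hk] at h

lemma rowsB_of_invalid (l : List (List (String × String))) (h : pvValidateA l = false) :
    pvRowsB l = none := by
  induction l with
  | nil => simp [pvValidateA] at h
  | cons item rest ih =>
    simp only [pvValidateA] at h
    by_cases hk : pvHasKeys item = true
    · rw [pvRowsB, pvRowB_of_hasKeys item hk, ih (by simpa [hk] using h)]
    · rw [pvRowsB, pvRowB_of_not_hasKeys item (by simpa using hk)]

lemma pv_str_ext (s t : String) (h : s.toList = t.toList) : s = t := by
  have h2 := congrArg String.ofList h
  rwa [String.ofList_toList, String.ofList_toList] at h2

lemma pv_join_cons (s : String) (l : List String) :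
    PySem.Str.join "" (s :: l) = s ++ PySem.Str.join "" l := by
  apply pv_str_ext
  cases l with
  | nil => simp [PySem.Str.join, PySem.Chars.join_singleton, PySem.Chars.join_nil]
  | cons b r => simp [PySem.Str.join, PySem.Chars.join_cons_cons]

lemma pv_append_empty (s : String) : s ++ "" = s := by
  apply pv_str_ext
  simp

lemma pv_empty_append (s : String) : "" ++ s = s := by
  apply pv_str_ext
  simp

lemma foldl_eq_join (l : List (List (String × String))) : ∀ acc : String,
    l.foldl (fun movement item => movement ++ pvRowA item) acc = acc ++ PySem.Str.join "" (l.map pvRowA) := by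
  induction l with
  | nil =>
    intro acc
    simp only [List.foldl_nil, List.map_nil]
    rw [show PySem.Str.join "" ([] : List String) = "" from rfl, pv_append_empty]
  | cons item rest ih =>
    intro acc
    simp only [List.map, List.foldl_cons]
    rw [ih (acc ++ pvRowA item), pv_join_cons, String.append_assoc]

-- ===== VERDICT (by name: the statement is the Claim_ definition above) =====
theorem convert_list_to_str_spec : Claim_equal_convert_list_to_str := by
  intro l _
  unfold Spec_convert_list_to_str convert_list_to_str convert_list_to_str_alt
  by_cases hv : pvValidateA l = true
  · rw [if_pos hv, rowsB_of_valid l hv, foldl_eq_join l ""]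
    exact pv_empty_append _
  · rw [if_neg hv, rowsB_of_invalid l (Bool.eq_false_iff.mpr hv)]
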